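-- pv_equiv track=rewrite | github.com/clzoc/VQE-MC-PDFT | quantum_circuit_cutting/reconstruction.py | group_commuting_paulis
-- ===== SOURCE A (Python) =====
-- from typing import Callable, Dict, List, Optional, Tuple
--
-- def group_commuting_paulis(
--     pauli_strings: List[str],
-- ) -> List[List[str]]:
--     """Group Pauli strings into qubit-wise commuting (QWC) sets.
--
--     Two Pauli strings commute qubit-wise if, for every qubit position,
--     at least one of them has I, or they have the same Pauli operator.
--
--     Uses a greedy coloring approach: for each string, try to add it to
--     an existing group; if no group is compatible, start a new one.
--
--     Returns:
--         List of groups, each group is a list of compatible Pauli strings.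
--     """
--     groups: List[List[str]] = []
--
--     for ps in pauli_strings:
--         placed = False
--         for group in groups:
--             if all(_qwc_compatible(ps, existing) for existing in group):
--                 group.append(ps)
--                 placed = True
--                 break
--         if not placed:
--             groups.append([ps])
--
--     return groups
--
-- def _qwc_compatible(ps1: str, ps2: str) -> bool:
--     """Check if two Pauli strings are qubit-wise commuting."""
--     for c1, c2 in zip(ps1, ps2):
--         if c1 != "I" and c2 != "I" and c1 != c2:
--             return False
--     return True
-- ===== SOURCE B (Python) =====
-- from typing import Dict, List, Optional
--
--
-- def group_commuting_paulis(
--     pauli_strings: List[str],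
-- ) -> List[List[str]]:
--     """Group Pauli strings into qubit-wise commuting (QWC) sets.
--
--     Same greedy first-fit grouping as the original, but each group is
--     summarised by a sparse dict {qubit position -> non-I operator}; a
--     candidate is tested against that dict instead of against every member.
--     """
--     groups: List[List[str]] = []
--     patterns: List[Dict[int, str]] = []
--     for ps in pauli_strings:
--         i = _find_slot(ps, patterns)
--         if i is None:
--             groups.append([ps])
--             patterns.append({j: c for j, c in enumerate(ps) if c != "I"})
--         else:
--             groups[i].append(ps)
--             pat = patterns[i]
--             for j, c in enumerate(ps):
--                 if c != "I":
--                     pat[j] = c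
--     return groups
--
--
-- def _find_slot(ps: str, patterns: List[Dict[int, str]]) -> Optional[int]:
--     """Index of the first pattern compatible with ps, else None."""
--     for i, pat in enumerate(patterns):
--         if all(pat.get(j, c) == c for j, c in enumerate(ps) if c != "I"):
--             return i
--     return None
-- ===== Notes on version B (the rewrite author's own statement) =====
-- stated objective: alternative
-- what changed: B keeps a parallel list of sparse dicts (qubit position -> non-I operator), one per group, finds the first compatible group by testing the candidate once against each dict, and updates that group's dict in place, instead of re-scanning every member of every group.
import Mathlib
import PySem

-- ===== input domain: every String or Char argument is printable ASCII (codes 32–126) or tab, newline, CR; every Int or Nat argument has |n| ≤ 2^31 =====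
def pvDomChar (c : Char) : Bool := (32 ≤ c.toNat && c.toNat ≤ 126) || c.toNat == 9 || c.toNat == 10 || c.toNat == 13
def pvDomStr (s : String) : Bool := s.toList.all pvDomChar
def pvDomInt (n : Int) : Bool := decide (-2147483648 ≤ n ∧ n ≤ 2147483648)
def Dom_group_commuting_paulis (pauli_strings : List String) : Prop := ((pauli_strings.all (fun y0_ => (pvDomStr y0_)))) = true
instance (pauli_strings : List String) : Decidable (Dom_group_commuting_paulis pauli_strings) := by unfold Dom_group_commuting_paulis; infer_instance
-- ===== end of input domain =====

-- B summarises each group by one sparse dict (qubit position -> non-I operator) and tests a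
-- candidate once against that dict instead of scanning every group member (objective: alternative).


-- ===== PORT A =====
-- _qwc_compatible: loop over zipped characters with early return False
def qwcCompatible : List Char → List Char → Bool
  | c1 :: r1, c2 :: r2 =>
      if c1 ≠ 'I' ∧ c2 ≠ 'I' ∧ c1 ≠ c2 then false else qwcCompatible r1 r2
  | _, _ => true

-- inner 'for group in groups … break': first group all of whose members are compatible gets ps
def tryPlaceA (ps : String) : List (List String) → Option (List (List String))
  | [] => none
  | g :: rest =>
      if g.all (fun t => qwcCompatible ps.toList t.toList) then
        some ((g ++ [ps]) :: rest)
      else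
        (tryPlaceA ps rest).map (g :: ·)

def group_commuting_paulis (pauli_strings : List String) : List (List String) :=
  pauli_strings.foldl
    (fun groups ps =>
      match tryPlaceA ps groups with
      | some gs => gs
      | none => groups ++ [[ps]])
    []

-- ===== PORT B =====
-- {j: c for j, c in enumerate(ps) if c != "I"}
def patOfString (cs : List Char) : PySem.Dict Int Char :=
  ((PySem.List.enumerate cs).filter (fun jc => jc.2 ≠ 'I')).foldl
    (fun d jc => d.insert jc.1 jc.2) PySem.Dict.empty

-- the in-place update loop: for j, c in enumerate(ps): if c != "I": pat[j] = c
def updatePat (pat : PySem.Dict Int Char) (cs : List Char) : PySem.Dict Int Char :=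
  (PySem.List.enumerate cs).foldl
    (fun d jc => if jc.2 ≠ 'I' then d.insert jc.1 jc.2 else d) pat

-- all(pat.get(j, c) == c for j, c in enumerate(ps) if c != "I")
def compatD (cs : List Char) (pat : PySem.Dict Int Char) : Bool :=
  (PySem.List.enumerate cs).all
    (fun jc => if jc.2 ≠ 'I' then pat.getD jc.1 jc.2 == jc.2 else true)

-- _find_slot: index of the first compatible pattern, else None
def findSlot (cs : List Char) : List (PySem.Dict Int Char) → Option Nat
  | [] => none
  | pat :: rest =>
      if compatD cs pat then some 0 else (findSlot cs rest).map Nat.succ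

-- the main loop over pauli_strings with its two parallel lists of state
def loopB : List String → List (List String) → List (PySem.Dict Int Char) → List (List String)
  | [], groups, _ => groups
  | ps :: rest, groups, pats =>
      match findSlot ps.toList pats with
      | none => loopB rest (groups ++ [[ps]]) (pats ++ [patOfString ps.toList])
      | some i =>
          loopB rest (groups.modify i (· ++ [ps]))
            (pats.modify i (fun pat => updatePat pat ps.toList))

def group_commuting_paulis_alt (pauli_strings : List String) : List (List String) :=
  loopB pauli_strings [] []

-- ===== PRECONDITION & SPEC =====
def Spec_group_commuting_paulis (pauli_strings : List String) (out : List (List String)) : Prop := out = group_commuting_paulis_alt pauli_strings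
instance (pauli_strings : List String) (out : List (List String)) : Decidable (Spec_group_commuting_paulis pauli_strings out) := by unfold Spec_group_commuting_paulis; infer_instance

-- ===== CLAIM (what is proved, stated in full; the proofs are below) =====
def Claim_equal_group_commuting_paulis : Prop := ∀ (pauli_strings : List String), Dom_group_commuting_paulis pauli_strings → Spec_group_commuting_paulis pauli_strings (group_commuting_paulis pauli_strings)

-- ===== LEMMAS AND PROOFS =====

-- what the update loop writes at position j: the char of cs at j - s, if present and non-'I'
def sparse : List Char → Int → Int → Option Char
  | [], _, _ => none
  | c :: rest, s, j => if j = s ∧ c ≠ 'I' then some c else sparse rest (s + 1) j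

theorem sparse_none_of_lt (cs : List Char) : ∀ (s j : Int), j < s → sparse cs s j = none := by
  induction cs with
  | nil => intro s j _; rfl
  | cons c rest ih =>
    intro s j hj
    rw [sparse, if_neg (fun h => by omega)]
    exact ih (s + 1) j (by omega)

theorem sparse_some (cs : List Char) : ∀ (s j : Int) (c : Char), sparse cs s j = some c →
    ∃ k : Nat, j = s + k ∧ cs[k]? = some c ∧ c ≠ 'I' := by
  induction cs with
  | nil => intro s j c h; exact absurd h (by simp [sparse])
  | cons c0 rest ih =>
    intro s j c h
    rw [sparse] at h
    split_ifs at h with hcond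
    · injection h with h; subst h
      exact ⟨0, by omega, by simp, hcond.2⟩
    · obtain ⟨k, hk, hget, hI⟩ := ih (s + 1) j c h
      exact ⟨k + 1, by push_cast; omega, by simpa using hget, hI⟩

theorem sparse_of_get (cs : List Char) : ∀ (k : Nat) (c : Char), cs[k]? = some c → c ≠ 'I' →
    ∀ s : Int, sparse cs s (s + k) = some c := by
  induction cs with
  | nil => intro k c h; simp at h
  | cons c0 rest ih =>
    intro k c hget hI s
    cases k with
    | zero =>
      simp at hget; subst hget
      rw [sparse, if_pos ⟨by omega, hI⟩]
    | succ m =>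
      rw [sparse, if_neg (fun h => by omega)]
      have := ih m c (by simpa using hget) hI (s + 1)
      rw [show s + (↑(m + 1) : Int) = (s + 1) + m by push_cast; ring]
      exact this

theorem upd_get? (cs : List Char) : ∀ (s : Int) (pat : PySem.Dict Int Char) (j : Int),
    ((PySem.List.enumerate cs s).foldl
        (fun d jc => if jc.2 ≠ 'I' then d.insert jc.1 jc.2 else d) pat).get? j
      = match sparse cs s j with
        | some c => some c
        | none => pat.get? j := by
  induction cs with
  | nil => intro s pat j; simp [PySem.List.enumerate_nil, sparse]
  | cons c rest ih =>
    intro s pat j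
    rw [PySem.List.enumerate_cons, List.foldl_cons, sparse]
    by_cases hcond : j = s ∧ c ≠ 'I'
    · rw [if_pos hcond]
      rw [ih (s + 1) _ j, sparse_none_of_lt rest (s + 1) j (by omega)]
      simp [hcond.2, hcond.1]
    · rw [if_neg hcond]
      rw [ih (s + 1) _ j]
      cases hsp : sparse rest (s + 1) j with
      | some c' => rfl
      | none =>
        by_cases hI : c = 'I'
        · simp [hI]
        · have hj : j ≠ s := fun h => hcond ⟨h, hI⟩
          simp [hI, PySem.Dict.get?_insert, hj]

-- the group invariant: the dict covers every member's non-I char, and every dict entry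
-- is a non-I char of some member
def PatInvD (g : List String) (d : PySem.Dict Int Char) : Prop :=
  (∀ t ∈ g, ∀ (k : Nat) (ca : Char), t.toList[k]? = some ca → ca ≠ 'I' → d.get? (k : Int) = some ca) ∧
  (∀ (j : Int) (c : Char), d.get? j = some c →
      c ≠ 'I' ∧ ∃ t ∈ g, ∃ k : Nat, j = (k : Int) ∧ t.toList[k]? = some c)

theorem qwc_iff (a b : List Char) :
    qwcCompatible a b = true ↔
      ∀ (i : ℕ) (ca cb : Char), a[i]? = some ca → b[i]? = some cb →
        (ca = 'I' ∨ cb = 'I' ∨ ca = cb) := by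
  induction a generalizing b with
  | nil => simp [qwcCompatible]
  | cons c1 r1 ih =>
    cases b with
    | nil => simp [qwcCompatible]
    | cons c2 r2 =>
      rw [qwcCompatible]
      split
      · rename_i h
        constructor
        · intro hf; exact absurd hf (by simp)
        · intro hall
          exact absurd (hall 0 c1 c2 rfl rfl) (by tauto)
      · rename_i h
        rw [ih r2]
        constructor
        · intro hall i ca cb hca hcb
          cases i with
          | zero =>
            simp at hca hcb; subst hca; subst hcb; tauto
          | succ j => exact hall j ca cb (by simpa using hca) (by simpa using hcb)
        · intro hall i ca cb hca hcb
          exact hall (i + 1) ca cb (by simpa using hca) (by simpa using hcb)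

theorem compatD_iff (cs : List Char) (d : PySem.Dict Int Char) :
    compatD cs d = true ↔
      ∀ (k : Nat) (ca : Char), cs[k]? = some ca → ca ≠ 'I' → d.getD (k : Int) ca = ca := by
  unfold compatD
  rw [List.all_eq_true]
  constructor
  · intro h k ca hget hI
    have hk : k < cs.length := (List.getElem?_eq_some_iff.mp hget).1
    have hmem : ((0 : Int) + k, cs[k]) ∈ PySem.List.enumerate cs 0 :=
      (PySem.List.mem_enumerate_iff _ _ _).mpr ⟨k, hk, rfl⟩
    have hca : cs[k] = ca := by
      have := (List.getElem?_eq_some_iff.mp hget).2; exact this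
    rw [hca] at hmem
    have := h _ hmem
    simp only [hI, ne_eq, not_false_iff, if_true, zero_add] at this
    exact (beq_iff_eq).mp (by simpa using this)
  · intro h jc hmem
    obtain ⟨k, hk, rfl⟩ := (PySem.List.mem_enumerate_iff _ _ _).mp hmem
    by_cases hI : cs[k] = 'I'
    · simp [hI]
    · have := h k cs[k] (List.getElem?_eq_some_iff.mpr ⟨hk, rfl⟩) hI
      simp only [hI, ne_eq, not_false_iff, if_true, zero_add]
      simpa using this

theorem compat_iff_all (g : List String) (d : PySem.Dict Int Char) (s : String)
    (hinv : PatInvD g d) :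
    compatD s.toList d = true ↔ ∀ t ∈ g, qwcCompatible s.toList t.toList = true := by
  rw [compatD_iff]
  constructor
  · intro hp t ht
    rw [qwc_iff]
    intro i cs ct hcs hct
    by_cases hsI : cs = 'I'
    · exact Or.inl hsI
    by_cases htI : ct = 'I'
    · exact Or.inr (Or.inl htI)
    have hd := hinv.1 t ht i ct hct htI
    have := hp i cs hcs hsI
    rw [PySem.Dict.getD_eq_get?_getD, hd] at this
    exact Or.inr (Or.inr this.symm)
  · intro hall k ca hget hI
    cases hd : d.get? (k : Int) with
    | none => rw [PySem.Dict.getD_eq_get?_getD, hd]; rfl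
    | some c =>
      obtain ⟨hcI, t, ht, m, hm, hmt⟩ := hinv.2 (k : Int) c hd
      have hkm : k = m := by exact_mod_cast hm
      subst hkm
      have := (qwc_iff _ _).mp (hall t ht) k ca c hget hmt
      rw [PySem.Dict.getD_eq_get?_getD, hd]
      rcases this with h | h | h
      · exact absurd h hI
      · exact absurd h hcI
      · exact h.symm

theorem patOfString_eq (cs : List Char) : patOfString cs = updatePat PySem.Dict.empty cs := by
  unfold patOfString updatePat
  rw [List.foldl_filter]
  congr 1
  funext d jc
  by_cases h : jc.2 = 'I' <;> simp [h]

theorem patOfString_get? (cs : List Char) (j : Int) :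
    (patOfString cs).get? j
      = match sparse cs 0 j with
        | some c => some c
        | none => none := by
  rw [patOfString_eq]
  unfold updatePat
  rw [upd_get? cs 0 PySem.Dict.empty j]
  cases sparse cs 0 j <;> simp

theorem patInvD_singleton (s : String) : PatInvD [s] (patOfString s.toList) := by
  constructor
  · intro t ht k ca hget hI
    simp only [List.mem_singleton] at ht; subst ht
    rw [patOfString_get? t.toList (k : Int)]
    rw [show ((k : Int)) = 0 + (k : Int) by ring, sparse_of_get t.toList k ca hget hI 0]
  · intro j c h
    rw [patOfString_get? s.toList j] at h
    cases hsp : sparse s.toList 0 j with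
    | none => rw [hsp] at h; simp at h
    | some c' =>
      rw [hsp] at h
      obtain ⟨k, hk, hget, hI⟩ := sparse_some s.toList 0 j c' hsp
      have hcc : c' = c := by simpa using h
      subst hcc
      exact ⟨hI, s, by simp, k, by omega, hget⟩

theorem patInvD_step (g : List String) (d : PySem.Dict Int Char) (s : String)
    (hinv : PatInvD g d) (hc : compatD s.toList d = true) :
    PatInvD (g ++ [s]) (updatePat d s.toList) := by
  have hupd : ∀ j : Int, (updatePat d s.toList).get? j
      = match sparse s.toList 0 j with
        | some c => some c
        | none => d.get? j := fun j => upd_get? s.toList 0 d j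
  rw [compatD_iff] at hc
  constructor
  · intro t ht k ca hget hI
    rcases List.mem_append.mp ht with ht | ht
    · have hd := hinv.1 t ht k ca hget hI
      cases hsp : sparse s.toList 0 (k : Int) with
      | none => rw [hupd (k : Int), hsp]; exact hd
      | some cb =>
        rw [hupd (k : Int), hsp]
        obtain ⟨m, hm, hgetb, hIb⟩ := sparse_some s.toList 0 (k : Int) cb hsp
        have hkm : k = m := by omega
        subst hkm
        have h2 := hc k cb hgetb hIb
        rw [PySem.Dict.getD_eq_get?_getD, hd] at h2
        simp only [Option.getD_some] at h2
        show some cb = some ca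
        rw [h2]
    · simp only [List.mem_singleton] at ht; subst ht
      rw [hupd (k : Int), show ((k : Int)) = 0 + (k : Int) by ring,
        sparse_of_get t.toList k ca hget hI 0]
  · intro j c h
    rw [hupd j] at h
    cases hsp : sparse s.toList 0 j with
    | some c' =>
      rw [hsp] at h
      obtain ⟨k, hk, hget, hI⟩ := sparse_some s.toList 0 j c' hsp
      have hcc : c' = c := by simpa using h
      subst hcc
      exact ⟨hI, s, by simp, k, by omega, hget⟩
    | none =>
      rw [hsp] at h
      obtain ⟨hcI, t, ht, k, hk, hget⟩ := hinv.2 j c h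
      exact ⟨hcI, t, by simp [ht], k, hk, hget⟩

theorem place_rel (ps : String) :
    ∀ (groups : List (List String)) (pats : List (PySem.Dict Int Char)),
      List.Forall₂ PatInvD groups pats →
      tryPlaceA ps groups = (findSlot ps.toList pats).map (fun i => groups.modify i (· ++ [ps])) ∧
      ∀ i, findSlot ps.toList pats = some i →
        List.Forall₂ PatInvD (groups.modify i (· ++ [ps]))
          (pats.modify i (fun pat => updatePat pat ps.toList)) := by
  intro groups pats hinv
  induction hinv with
  | nil =>
    refine ⟨rfl, ?_⟩
    intro i hi
    exact absurd hi (by simp [findSlot])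
  | @cons g p gs ps' hhead htail ih =>
    by_cases h : compatD ps.toList p = true
    · have hall : (g.all fun t => qwcCompatible ps.toList t.toList) = true := by
        rw [List.all_eq_true]
        exact (compat_iff_all g p ps hhead).mp h
      constructor
      · rw [tryPlaceA, if_pos hall, findSlot, if_pos h]
        simp [List.modify_zero_cons]
      · intro i hi
        rw [findSlot, if_pos h] at hi
        injection hi with hi
        subst hi
        simp only [List.modify_zero_cons]
        exact List.Forall₂.cons (patInvD_step g p ps hhead h) htail
    · have hall : (g.all fun t => qwcCompatible ps.toList t.toList) = false := by
        rw [Bool.eq_false_iff]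
        intro hcontra
        rw [List.all_eq_true] at hcontra
        exact h ((compat_iff_all g p ps hhead).mpr hcontra)
      constructor
      · rw [tryPlaceA, if_neg (by simp [hall]), findSlot, if_neg (by simp [h]), ih.1]
        cases findSlot ps.toList ps' with
        | none => rfl
        | some m => simp [List.modify_succ_cons]
      · intro i hi
        rw [findSlot, if_neg (by simp [h])] at hi
        cases hf : findSlot ps.toList ps' with
        | none => rw [hf] at hi; exact absurd hi (by simp)
        | some m =>
          rw [hf] at hi
          injection hi with hi
          subst hi
          simp only [List.modify_succ_cons]
          exact List.Forall₂.cons hhead (ih.2 m hf)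

theorem loop_rel : ∀ (xs : List String) (groups : List (List String))
    (pats : List (PySem.Dict Int Char)), List.Forall₂ PatInvD groups pats →
    xs.foldl
        (fun groups ps =>
          match tryPlaceA ps groups with
          | some gs => gs
          | none => groups ++ [[ps]]) groups
      = loopB xs groups pats := by
  intro xs
  induction xs with
  | nil => intro groups pats _; rfl
  | cons ps xs ih =>
    intro groups pats hinv
    obtain ⟨hA, hB⟩ := place_rel ps groups pats hinv
    rw [List.foldl_cons, loopB]
    cases hf : findSlot ps.toList pats with
    | none =>
      rw [hf] at hA
      simp only [Option.map_none] at hA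
      rw [hA]
      exact ih (groups ++ [[ps]]) (pats ++ [patOfString ps.toList])
        (List.rel_append hinv (List.Forall₂.cons (patInvD_singleton ps) List.Forall₂.nil))
    | some i =>
      rw [hf] at hA
      simp only [Option.map_some] at hA
      rw [hA]
      exact ih _ _ (hB i hf)

-- ===== VERDICT (by name: the statement is the Claim_ definition above) =====
theorem group_commuting_paulis_spec : Claim_equal_group_commuting_paulis := by
  intro pauli_strings _
  unfold Spec_group_commuting_paulis group_commuting_paulis group_commuting_paulis_alt
  exact loop_rel pauli_strings [] [] List.Forall₂.nil
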